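-- pv_equiv track=rewrite | github.com/mangipudideepak23-jpg/Error-Resilient-RISCV-Processor | Error Resilient RISCV CPU/simulate_bch_ecc.py | bch_encode
-- ===== SOURCE A (Python) =====
-- def bch_encode(data32):
--     """Return 45-bit BCH codeword for a 32-bit data word."""
--     data32 = int(data32) & 0xFFFFFFFF
--     # divreg = {data_in, 12'b0}  — 44 bits (indices 0..43)
--     divreg = (data32 << 12) & ((1 << 44) - 1)
--
--     for i in range(43, 11, -1):
--         if (divreg >> i) & 1:
--             divreg ^= (1 << i)       # bit i cleared
--             divreg ^= (1 << (i-2))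
--             divreg ^= (1 << (i-4))
--             divreg ^= (1 << (i-7))
--             divreg ^= (1 << (i-8))
--             divreg ^= (1 << (i-9))
--             divreg ^= (1 << (i-12))
--
--     parity = divreg & 0xFFF          # bits 11:0
--     # codeword = {1'b0, data_in, parity} = bit44=0, bits43:12=data, bits11:0=parity
--     codeword = (data32 << 12) | parity
--     return codeword & ((1 << 45) - 1)
-- ===== SOURCE B (Python) =====
-- def bch_encode(data32):
--     """Return 45-bit BCH codeword for a 32-bit data word (LFSR remainder)."""
--     data32 = int(data32) & 0xFFFFFFFF
--     rem = 0
--     for bit in range(31, -1, -1):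
--         fb = ((rem >> 11) & 1) ^ ((data32 >> bit) & 1)
--         rem = (rem << 1) & 0xFFF
--         if fb:
--             rem ^= 0x539
--     return ((data32 << 12) | rem) & ((1 << 45) - 1)
-- ===== Notes on version B (the rewrite author's own statement) =====
-- stated objective: alternative
-- what changed: Replaces the wide (forty-four-bit) dividend register that is bit-cleared top-down with seven single-bit XORs per step by a standard twelve-bit LFSR: a small remainder register shifted once per data bit with one conditional XOR of the generator's low bits.
import Mathlib
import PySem

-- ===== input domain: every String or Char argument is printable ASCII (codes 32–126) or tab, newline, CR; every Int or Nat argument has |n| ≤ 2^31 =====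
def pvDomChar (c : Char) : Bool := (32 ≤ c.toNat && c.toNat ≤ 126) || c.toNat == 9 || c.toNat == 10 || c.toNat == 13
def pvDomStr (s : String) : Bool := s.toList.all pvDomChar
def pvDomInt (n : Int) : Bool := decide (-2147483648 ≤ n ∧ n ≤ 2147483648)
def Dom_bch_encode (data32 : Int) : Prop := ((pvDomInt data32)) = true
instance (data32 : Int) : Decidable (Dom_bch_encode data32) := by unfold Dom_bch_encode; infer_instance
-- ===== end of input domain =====

-- B re-implements the wide-dividend bit-clearing division as a twelve-bit LFSR over the data
-- bits (alternative formulation, same cost); equality of the two parities is proved for all Int.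
-- After the initial `& 0xFFFFFFFF` every Python int in both programs is provably nonnegative,
-- so the loop states are held as Nat (exact on all inputs).

-- ===== PORT A =====
-- for i in range(43, 11, -1): fuel n+1 corresponds to i = n + 12 (n = 31 … 0)
def pvBchDivLoop : Nat → Nat → Nat
  | divreg, 0 => divreg
  | divreg, n+1 =>
    let i := n + 12
    let divreg :=
      if (divreg >>> i) &&& 1 = 1 then
        ((((((divreg ^^^ (1 <<< i)) ^^^ (1 <<< (i-2))) ^^^ (1 <<< (i-4))) ^^^ (1 <<< (i-7)))
            ^^^ (1 <<< (i-8))) ^^^ (1 <<< (i-9))) ^^^ (1 <<< (i-12))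
      else divreg
    pvBchDivLoop divreg n

def bch_encode (data32 : Int) : Int :=
  let d : Nat := (PySem.Int.band data32 0xFFFFFFFF).toNat   -- data32 = int(data32) & 0xFFFFFFFF  (≥ 0)
  let divreg : Nat := (d <<< 12) &&& ((1 <<< 44) - 1)
  let divreg := pvBchDivLoop divreg 32
  let parity := divreg &&& 0xFFF
  let codeword := (d <<< 12) ||| parity
  ((codeword &&& ((1 <<< 45) - 1) : Nat) : Int)

-- ===== PORT B =====
-- for bit in range(31, -1, -1): fuel n+1 corresponds to bit = n (n = 31 … 0)
def pvBchLfsr : Nat → Nat → Nat → Nat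
  | rem, _, 0 => rem
  | rem, d, n+1 =>
    let fb := ((rem >>> 11) &&& 1) ^^^ ((d >>> n) &&& 1)
    let rem := (rem <<< 1) &&& 0xFFF
    let rem := if fb ≠ 0 then rem ^^^ 0x539 else rem
    pvBchLfsr rem d n

def bch_encode_alt (data32 : Int) : Int :=
  let d : Nat := (PySem.Int.band data32 0xFFFFFFFF).toNat   -- data32 = int(data32) & 0xFFFFFFFF  (≥ 0)
  let rem := pvBchLfsr 0 d 32
  ((((d <<< 12) ||| rem) &&& ((1 <<< 45) - 1) : Nat) : Int)

-- ===== PRECONDITION & SPEC =====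
def Spec_bch_encode (data32 : Int) (out : Int) : Prop := out = bch_encode_alt data32
instance (data32 : Int) (out : Int) : Decidable (Spec_bch_encode data32 out) := by unfold Spec_bch_encode; infer_instance

-- ===== CLAIM (what is proved, stated in full; the proofs are below) =====
def Claim_equal_bch_encode : Prop := ∀ (data32 : Int), Dom_bch_encode data32 → Spec_bch_encode data32 (bch_encode data32)

-- ===== LEMMAS AND PROOFS =====

-- (x >>> i) &&& 1 as a testBit
lemma pv_and1 (x i : Nat) : (x >>> i) &&& 1 = if x.testBit i then 1 else 0 := by
  simp [Nat.and_one_is_mod, Nat.shiftRight_eq_div_pow, Nat.testBit_eq_decide_div_mod_eq]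
  rcases Nat.mod_two_eq_zero_or_one (x / 2 ^ i) with h | h <;> simp [h]

-- the LFSR register stays below 2^12
lemma pv_lfsr_lt (n : Nat) : ∀ r d : Nat, r < 4096 → pvBchLfsr r d n < 4096 := by
  induction n with
  | zero => intro r d hr; simpa [pvBchLfsr] using hr
  | succ n ih =>
    intro r d hr
    simp only [pvBchLfsr]
    apply ih
    have h := Nat.and_two_pow_sub_one_eq_mod (r <<< 1) 12
    norm_num at h
    have hm := Nat.mod_lt (r <<< 1) (y := 4096) (by norm_num)
    have hlt : (r <<< 1) &&& 0xFFF < 4096 := by omega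
    split
    · have := Nat.xor_lt_two_pow (n := 12) (x := (r <<< 1) &&& 0xFFF) (y := 0x539)
      norm_num at this
      exact this hlt
    · exact hlt


lemma pv_tb_toNat (b : Bool) (k : Nat) : (b.toNat).testBit k = (b && decide (k = 0)) := by
  cases b <;> cases k <;> simp [Nat.testBit_succ]

lemma pv_split_low12 (x : Nat) (hx : x < 8192) :
    x = (x &&& 0xFFF) ^^^ ((x.testBit 12).toNat <<< 12) := by
  apply Nat.eq_of_testBit_eq
  intro j
  simp only [Nat.testBit_xor, Nat.testBit_and, Nat.testBit_shiftLeft, pv_tb_toNat]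
  rcases lt_trichotomy j 12 with hj | rfl | hj
  · have : (4095 : Nat).testBit j = true := by
      have := Nat.testBit_two_pow_sub_one 12 j
      simp [this, hj]
    simp [this, show ¬ (12 ≤ j) by omega]
  · simp [show (4095:Nat).testBit 12 = false from by decide]
  · have hx' : x.testBit j = false := Nat.testBit_lt_two_pow (by
      calc x < 8192 := hx
        _ ≤ 2 ^ j := by
          have : (13:Nat) ≤ j := by omega
          calc (8192:Nat) = 2 ^ 13 := by norm_num
            _ ≤ 2 ^ j := Nat.pow_le_pow_right (by norm_num) this)
    have h4 : (4095 : Nat).testBit j = false := Nat.testBit_lt_two_pow (by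
      calc (4095:Nat) < 2 ^ 12 := by norm_num
        _ ≤ 2 ^ j := Nat.pow_le_pow_right (by norm_num) (by omega))
    simp [hx', h4, show j - 12 ≠ 0 by omega]

lemma pv_split_mod (d n : Nat) :
    d % 2^(n+1) = (d % 2^n) ^^^ ((d.testBit n).toNat <<< n) := by
  apply Nat.eq_of_testBit_eq
  intro j
  simp only [Nat.testBit_xor, Nat.testBit_mod_two_pow, Nat.testBit_shiftLeft, pv_tb_toNat]
  rcases lt_trichotomy j n with hj | rfl | hj
  · simp [hj, show j < n + 1 by omega, show ¬ (n ≤ j) by omega]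
  · simp
  · simp [show ¬ (j < n + 1) by omega, show ¬ (j < n) by omega, show j - n ≠ 0 by omega,
      show n ≤ j by omega]

lemma pv_step (n r d : Nat) (hr : r < 4096) (b : Bool)
    (hfb : (r.testBit 11 ^^ d.testBit n) = b) :
    ((r <<< (n+1)) ^^^ ((d % 2^(n+1)) <<< 12)) ^^^ ((if b then 0x1539 else 0) <<< n)
    = ((((r <<< 1) &&& 0xFFF) ^^^ (if b then 0x539 else 0)) <<< n) ^^^ ((d % 2^n) <<< 12) := by
  have hsh : r <<< (n+1) = (((r <<< 1) &&& 0xFFF) <<< n) ^^^ ((r.testBit 11).toNat <<< (n+12)) := by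
    have h8 : r <<< 1 < 8192 := by rw [Nat.shiftLeft_eq]; omega
    have ht : (r <<< 1).testBit 12 = r.testBit 11 := by
      simp [Nat.testBit_shiftLeft]
    calc r <<< (n+1) = r <<< (1+n) := by rw [Nat.add_comm]
      _ = (r <<< 1) <<< n := Nat.shiftLeft_add r 1 n
      _ = (((r <<< 1) &&& 0xFFF) ^^^ ((r.testBit 11).toNat <<< 12)) <<< n := by
            rw [← ht, ← pv_split_low12 _ h8]
      _ = (((r <<< 1) &&& 0xFFF) <<< n) ^^^ (((r.testBit 11).toNat <<< 12) <<< n) :=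
            Nat.shiftLeft_xor_distrib ..
      _ = _ := by rw [← Nat.shiftLeft_add, Nat.add_comm 12 n]
  have hd : (d % 2^(n+1)) <<< 12 = ((d % 2^n) <<< 12) ^^^ ((d.testBit n).toNat <<< (n+12)) := by
    rw [pv_split_mod, Nat.shiftLeft_xor_distrib, ← Nat.shiftLeft_add]
  have hc : (if b then (0x1539:Nat) else 0) <<< n
      = ((if b then (0x539:Nat) else 0) <<< n) ^^^ ((b.toNat) <<< 12) <<< n := by
    have h : (if b then (0x1539:Nat) else 0) = (if b then (0x539:Nat) else 0) ^^^ (b.toNat <<< 12) := by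
      cases b <;> decide
    rw [h, Nat.shiftLeft_xor_distrib]
  rw [hsh, hd, hc, ← Nat.shiftLeft_add (b.toNat), Nat.add_comm 12 n]
  subst hfb
  cases hrb : r.testBit 11 <;> cases hdn : d.testBit n <;>
    simp [Nat.shiftLeft_xor_distrib, Nat.xor_assoc, Nat.xor_comm, Nat.xor_left_comm, Nat.xor_self,
      Nat.zero_xor, Nat.zero_shiftLeft]

lemma pv_inv (n : Nat) : ∀ r d : Nat, r < 4096 →
    pvBchDivLoop ((r <<< n) ^^^ ((d % 2 ^ n) <<< 12)) n = pvBchLfsr r d n := by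
  induction n with
  | zero => intro r d hr; simp [pvBchDivLoop, pvBchLfsr, Nat.mod_one, Nat.zero_shiftLeft, Nat.xor_zero]
  | succ n ih =>
    intro r d hr
    have low_lt : (r <<< 1) &&& 0xFFF < 4096 := by
      have h := Nat.and_two_pow_sub_one_eq_mod (r <<< 1) 12
      norm_num at h
      have := Nat.mod_lt (r <<< 1) (y := 4096) (by norm_num)
      omega
    have hbit : ((r <<< (n+1)) ^^^ ((d % 2 ^ (n+1)) <<< 12)).testBit (n+12)
        = (r.testBit 11 ^^ d.testBit n) := by
      simp [Nat.testBit_xor, Nat.testBit_shiftLeft, Nat.testBit_mod_two_pow,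
        show n + 12 - (n+1) = 11 from by omega, show n + 12 - 12 = n from by omega,
        show n + 1 ≤ n + 12 from by omega, show (12:Nat) ≤ n + 12 from by omega,
        show n < n + 1 from by omega]
    have hseven : ∀ x : Nat,
        ((((((x ^^^ (1 <<< (n+12))) ^^^ (1 <<< (n+12-2))) ^^^ (1 <<< (n+12-4))) ^^^ (1 <<< (n+12-7)))
            ^^^ (1 <<< (n+12-8))) ^^^ (1 <<< (n+12-9))) ^^^ (1 <<< (n+12-12))
        = x ^^^ ((0x1539:Nat) <<< n) := by
      intro x
      have hc : (0x1539:Nat) <<< n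
          = ((1 <<< (n+12)) ^^^ (1 <<< (n+10)) ^^^ (1 <<< (n+8)) ^^^ (1 <<< (n+5))
              ^^^ (1 <<< (n+4)) ^^^ (1 <<< (n+3)) ^^^ (1 <<< n)) := by
        rw [show n+12 = 12+n from by omega, show n+10 = 10+n from by omega,
            show n+8 = 8+n from by omega, show n+5 = 5+n from by omega,
            show n+4 = 4+n from by omega, show n+3 = 3+n from by omega,
            Nat.shiftLeft_add, Nat.shiftLeft_add, Nat.shiftLeft_add, Nat.shiftLeft_add,
            Nat.shiftLeft_add, Nat.shiftLeft_add,
            ← Nat.shiftLeft_xor_distrib, ← Nat.shiftLeft_xor_distrib, ← Nat.shiftLeft_xor_distrib,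
            ← Nat.shiftLeft_xor_distrib, ← Nat.shiftLeft_xor_distrib, ← Nat.shiftLeft_xor_distrib]
        congr 1
      rw [show n+12-2 = n+10 from by omega, show n+12-4 = n+8 from by omega,
          show n+12-7 = n+5 from by omega, show n+12-8 = n+4 from by omega,
          show n+12-9 = n+3 from by omega, show n+12-12 = n from by omega,
          hc]
      simp [Nat.xor_assoc]
    simp only [pvBchDivLoop, pvBchLfsr, pv_and1, hbit]
    by_cases hb : (r.testBit 11 ^^ d.testBit n) = true
    · have hB : (((if r.testBit 11 then 1 else 0) : Nat) ^^^ (if d.testBit n then 1 else 0)) ≠ 0 := by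
        cases hrb : r.testBit 11 <;> cases hdn : d.testBit n <;> simp_all
      have hstep := pv_step n r d hr true hb
      simp only [if_true] at hstep
      rw [if_pos (by simp [hb]), if_pos hB, hseven, hstep]
      exact ih _ d (by
        have := Nat.xor_lt_two_pow (n := 12) (x := (r <<< 1) &&& 0xFFF) (y := 0x539)
        norm_num at this
        exact this low_lt)
    · have hb' : (r.testBit 11 ^^ d.testBit n) = false := by simpa using hb
      have hB : ¬ ((((if r.testBit 11 then 1 else 0) : Nat) ^^^ (if d.testBit n then 1 else 0)) ≠ 0) := by
        cases hrb : r.testBit 11 <;> cases hdn : d.testBit n <;> simp_all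
      have hstep := pv_step n r d hr false hb'
      simp only [Bool.false_eq_true, if_false, Nat.zero_shiftLeft, Nat.xor_zero] at hstep
      rw [if_neg (by simp [hb']), if_neg hB, hstep]
      exact ih _ d low_lt

lemma pv_parity_eq (d : Nat) :
    pvBchDivLoop ((d <<< 12) &&& ((1 <<< 44) - 1)) 32 &&& 0xFFF = pvBchLfsr 0 d 32 := by
  have h1 : (d <<< 12) &&& ((1 <<< 44) - 1) = (0 <<< 32) ^^^ ((d % 2 ^ 32) <<< 12) := by
    rw [Nat.one_shiftLeft]
    have ha : (d <<< 12) &&& (2 ^ 44 - 1) = (d <<< 12) % 2 ^ 44 :=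
      Nat.and_two_pow_sub_one_eq_mod (d <<< 12) 44
    rw [ha]
    rw [show ((0:Nat) <<< 32) = 0 from by simp, Nat.zero_xor]
    conv_lhs => rw [Nat.shiftLeft_eq]
    rw [show (2:Nat) ^ 44 = 2 ^ 32 * 2 ^ 12 from by norm_num, Nat.mul_mod_mul_right,
      ← Nat.shiftLeft_eq]
  rw [h1, pv_inv 32 0 d (by norm_num)]
  have hlt := pv_lfsr_lt 32 0 d (by norm_num)
  have h := Nat.and_two_pow_sub_one_eq_mod (pvBchLfsr 0 d 32) 12
  norm_num at h
  rw [show (0xFFF : Nat) = 4095 from rfl, h, Nat.mod_eq_of_lt hlt]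

-- ===== VERDICT (by name: the statement is the Claim_ definition above) =====
theorem bch_encode_spec : Claim_equal_bch_encode := by
  intro data32 _
  unfold Spec_bch_encode
  simp only [bch_encode, bch_encode_alt, pv_parity_eq]
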